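-- pv_equiv track=rewrite | github.com/getingineed/PythonReadBook | main.py | get_word_num
-- ===== SOURCE A (Python) =====
-- def get_word_num(oristr):
--     if not oristr:
--         return 0
--     if 'a' <= oristr[0] <= 'z' or 'A' <= oristr[0] <= 'Z':
--         sum_wd = 1
--     else:
--         sum_wd=0
--     for i in range(1, len(oristr)):
--         if ('a' <= oristr[i] <= 'z' or 'A' <= oristr[i] <= 'Z') \
--                 and not ('a' <= oristr[i - 1] <= 'z' or 'A' <= oristr[i - 1] <= 'Z'):
--             sum_wd += 1
--     return sum_wd
-- ===== SOURCE B (Python) =====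
-- def get_word_num(oristr):
--     # words = (#letter chars) - (#adjacent letter-letter pairs):
--     # a word of length k contributes k letters and k-1 internal pairs, net 1.
--     flags = ['a' <= c <= 'z' or 'A' <= c <= 'Z' for c in oristr]
--     return sum(flags) - sum(1 for a, b in zip(flags, flags[1:]) if a and b)
-- ===== Notes on version B (the rewrite author's own statement) =====
-- stated objective: alternative
-- what changed: Replaces the boundary-detecting scan with the arithmetic identity words = (#letter characters) - (#adjacent letter-letter pairs), computed as two independent counts over a flag list and its shifted zip.
import Mathlib
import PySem

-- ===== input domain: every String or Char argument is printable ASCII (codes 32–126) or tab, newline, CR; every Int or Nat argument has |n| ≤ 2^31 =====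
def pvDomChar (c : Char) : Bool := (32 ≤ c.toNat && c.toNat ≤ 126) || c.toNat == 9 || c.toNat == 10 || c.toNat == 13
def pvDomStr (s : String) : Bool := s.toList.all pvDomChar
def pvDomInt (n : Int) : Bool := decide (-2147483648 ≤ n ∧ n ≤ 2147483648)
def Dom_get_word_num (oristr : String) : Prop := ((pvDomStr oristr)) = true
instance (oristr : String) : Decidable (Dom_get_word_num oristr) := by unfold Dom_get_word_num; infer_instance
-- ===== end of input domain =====

-- B replaces A's boundary-detecting scan by the arithmetic identity
-- words = (#letter chars) - (#adjacent letter-letter pairs), two staged counts.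


-- ===== PORT A =====
-- 'a' <= c <= 'z' or 'A' <= c <= 'Z'  (shared character test, verbatim in both Pythons)
def pvIsL (c : Char) : Bool := ('a' ≤ c && c ≤ 'z') || ('A' ≤ c && c ≤ 'Z')

-- every index in the loop is in range, so Python's oristr[i] = pyGetD with any default
def get_word_num (oristr : String) : Int :=
  let l := oristr.toList
  if l.isEmpty then 0
  else
    let sum0 : Int := if pvIsL (PySem.List.pyGetD l 0 ' ') then 1 else 0
    (PySem.List.pyRange 1 (l.length : Int) 1).foldl
      (fun s i =>
        if pvIsL (PySem.List.pyGetD l i ' ') && !(pvIsL (PySem.List.pyGetD l (i - 1) ' '))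
        then s + 1 else s)
      sum0

-- ===== PORT B =====
-- flags list, then sum(flags) minus the count of adjacent True-True pairs in zip(flags, flags[1:])
def get_word_num_alt (oristr : String) : Int :=
  let flags := oristr.toList.map pvIsL
  flags.foldl (fun s b => s + if b then 1 else 0) (0 : Int)
    - (flags.zip flags.tail).foldl (fun s p => s + if p.1 && p.2 then 1 else 0) (0 : Int)

-- ===== PRECONDITION & SPEC =====
def Spec_get_word_num (oristr : String) (out : Int) : Prop := out = get_word_num_alt oristr
instance (oristr : String) (out : Int) : Decidable (Spec_get_word_num oristr out) := by unfold Spec_get_word_num; infer_instance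

-- ===== CLAIM (what is proved, stated in full; the proofs are below) =====
def Claim_equal_get_word_num : Prop := ∀ (oristr : String), Dom_get_word_num oristr → Spec_get_word_num oristr (get_word_num oristr)

-- ===== LEMMAS AND PROOFS =====

-- transition count with a 'previous char was a letter' flag: the common reference form
def pvCountT (prev : Bool) : List Char → Int
  | [] => 0
  | c :: rest => (if pvIsL c && !prev then 1 else 0) + pvCountT (pvIsL c) rest

-- recursive forms of B's two sums
def pvSumL : List Bool → Int
  | [] => 0
  | b :: r => (if b then 1 else 0) + pvSumL r

def pvSumP : List Bool → Int
  | [] => 0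
  | [_] => 0
  | a :: b :: r => (if a && b then 1 else 0) + pvSumP (b :: r)

lemma pvFoldlL (l : List Bool) : ∀ s : Int,
    l.foldl (fun s b => s + if b then 1 else 0) s = s + pvSumL l := by
  induction l with
  | nil => intro s; simp [pvSumL]
  | cons b r ih => intro s; simp only [List.foldl_cons, pvSumL, ih]; ring

lemma pvFoldlP (l : List Bool) : ∀ s : Int,
    (l.zip l.tail).foldl (fun s p => s + if p.1 && p.2 then 1 else 0) s = s + pvSumP l := by
  induction l with
  | nil => intro s; simp [pvSumP]
  | cons a r ih =>
    intro s
    cases r with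
    | nil => simp [pvSumP]
    | cons b t =>
      simp only [List.tail_cons, List.zip_cons_cons, List.foldl_cons]
      have h := ih (s + if a && b then 1 else 0)
      simp only [List.tail_cons] at h
      rw [h]
      simp only [pvSumP]
      ring

-- key identity: transition count = letters - adjacent pairs (with prev prepended to the pairs)
lemma pvCountT_eq (l : List Char) : ∀ prev : Bool,
    pvCountT prev l = pvSumL (l.map pvIsL) - pvSumP (prev :: l.map pvIsL) := by
  induction l with
  | nil => intro prev; simp [pvCountT, pvSumL, pvSumP]
  | cons c r ih =>
    intro prev
    simp only [pvCountT, List.map_cons, pvSumL, pvSumP, ih (pvIsL c)]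
    cases h : pvIsL c <;> cases prev <;> simp <;> ring

-- A's index loop, started at j with the flag taken from l[j-1], is pvCountT on the suffix
lemma pvFoldlA (n : Nat) : ∀ (l : List Char) (j : Nat) (s : Int), l.length - j = n → 1 ≤ j → j ≤ l.length →
    (PySem.List.pyRange (j : Int) (l.length : Int) 1).foldl
      (fun s i => if pvIsL (PySem.List.pyGetD l i ' ') && !(pvIsL (PySem.List.pyGetD l (i - 1) ' '))
        then s + 1 else s) s
    = s + pvCountT (pvIsL (l.getD (j - 1) ' ')) (l.drop j) := by
  induction n with
  | zero =>
    intro l j s hn h1 h2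
    have hj : j = l.length := by omega
    subst hj
    simp [PySem.List.pyRange, pvCountT]
  | succ n ih =>
    intro l j s hn h1 h2
    have hj : j < l.length := by omega
    rw [PySem.List.pyRange_one_cons (by exact_mod_cast hj)]
    simp only [List.foldl_cons]
    have e1 : PySem.List.pyGetD l (j : Int) ' ' = l[j] := by
      rw [PySem.List.pyGetD_natCast]; exact List.getD_eq_getElem l ' ' hj
    have e2 : PySem.List.pyGetD l ((j : Int) - 1) ' ' = l.getD (j - 1) ' ' := by
      have : (j : Int) - 1 = ((j - 1 : Nat) : Int) := by omega
      rw [this, PySem.List.pyGetD_natCast]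
    have e3 : ((j : Int) + 1) = ((j + 1 : Nat) : Int) := by omega
    rw [e1, e2, e3, ih l (j + 1) _ (by omega) (by omega) (by omega)]
    have e4 : l.drop j = l[j] :: l.drop (j + 1) := List.drop_eq_getElem_cons hj
    have e5 : l.getD (j + 1 - 1) ' ' = l[j] := by
      have : j + 1 - 1 = j := by omega
      rw [this]; exact List.getD_eq_getElem l ' ' hj
    rw [e4, e5]
    simp only [pvCountT]
    split <;> omega

-- ===== VERDICT (by name: the statement is the Claim_ definition above) =====
theorem get_word_num_spec : Claim_equal_get_word_num := by
  intro oristr _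
  unfold Spec_get_word_num get_word_num get_word_num_alt
  cases hl : oristr.toList with
  | nil => simp [pvSumL, pvSumP]
  | cons c t =>
    have hne : (c :: t).isEmpty = false := rfl
    simp only [hne, Bool.false_eq_true, if_false]
    have e0 : PySem.List.pyGetD (c :: t) 0 ' ' = c := by
      rw [PySem.List.pyGetD_of_nonneg _ _ (by omega)]; rfl
    have hA := pvFoldlA ((c :: t).length - 1) (c :: t) 1
      (if pvIsL (PySem.List.pyGetD (c :: t) 0 ' ') then (1:Int) else 0) rfl (le_refl 1) (by simp)
    simp only [Nat.cast_one, Nat.sub_self, List.getD_cons_zero, List.drop_one,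
      List.tail_cons] at hA
    rw [hA, e0]
    rw [pvFoldlL, pvFoldlP]
    have := pvCountT_eq t (pvIsL c)
    simp only [List.map_cons, List.tail_cons, pvSumL, pvSumP] at *
    rw [this]
    cases h : pvIsL c <;> simp [pvSumP] <;> ring
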